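-- pv_equiv track=rewrite | github.com/Sneha1625/Architecture_modeling_system | features/securityscanner.py | get_security_rating
-- ===== SOURCE A (Python) =====
-- def get_security_rating(vulns: list) -> str:
--     critical = sum(1 for v in vulns if v["severity"] == "CRITICAL")
--     high = sum(1 for v in vulns if v["severity"] == "HIGH")
--
--     if critical > 0:
--         return "🔴 CRITICAL RISK"
--     elif high > 0:
--         return "🟠 HIGH RISK"
--     elif len(vulns) > 0:
--         return "🟡 MEDIUM RISK"
--     else:
--         return "🟢 SECURE"
-- ===== SOURCE B (Python) =====
-- _RATINGS = ["🟢 SECURE", "🟡 MEDIUM RISK", "🟠 HIGH RISK", "🔴 CRITICAL RISK"]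
--
-- def get_security_rating(vulns: list) -> str:
--     score = 0
--     for v in vulns:
--         s = v["severity"]
--         score = max(score, 3 if s == "CRITICAL" else 2 if s == "HIGH" else 1)
--     return _RATINGS[score]
-- ===== Notes on version B (the rewrite author's own statement) =====
-- stated objective: alternative
-- what changed: Replaces the two counting scans and the branch chain with a single max-reduction that maps each vulnerability to a numeric severity score (CRITICAL=3, HIGH=2, other=1) and indexes the result into a rating table.
import Mathlib
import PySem

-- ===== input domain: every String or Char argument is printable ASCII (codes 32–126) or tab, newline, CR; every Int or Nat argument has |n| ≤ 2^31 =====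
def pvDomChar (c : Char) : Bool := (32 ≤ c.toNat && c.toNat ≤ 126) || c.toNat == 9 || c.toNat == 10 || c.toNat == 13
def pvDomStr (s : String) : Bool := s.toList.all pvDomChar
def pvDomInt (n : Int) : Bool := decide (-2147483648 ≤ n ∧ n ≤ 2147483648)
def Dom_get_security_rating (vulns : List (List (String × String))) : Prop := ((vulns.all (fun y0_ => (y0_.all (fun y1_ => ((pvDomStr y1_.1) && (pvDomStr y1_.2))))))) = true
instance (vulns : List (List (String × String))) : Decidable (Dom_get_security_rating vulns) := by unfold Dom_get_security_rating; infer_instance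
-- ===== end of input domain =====

-- B replaces A's two counting scans and branch chain by a single max-reduction to a numeric
-- severity score (CRITICAL=3, HIGH=2, other=1) indexed into a rating table; equal wherever A returns.
-- ===== PORT A =====
def get_security_rating (vulns : List (List (String × String))) : String :=
  let critical : Int := vulns.foldl (fun n v => if (PySem.Dict.mk v).get? "severity" = some "CRITICAL" then n + 1 else n) 0
  let high : Int := vulns.foldl (fun n v => if (PySem.Dict.mk v).get? "severity" = some "HIGH" then n + 1 else n) 0
  if critical > 0 then "🔴 CRITICAL RISK"
  else if high > 0 then "🟠 HIGH RISK"
  else if (vulns.length : Int) > 0 then "🟡 MEDIUM RISK"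
  else "🟢 SECURE"

-- ===== PORT B =====
def pvRatings : List String := ["🟢 SECURE", "🟡 MEDIUM RISK", "🟠 HIGH RISK", "🔴 CRITICAL RISK"]

def get_security_rating_alt (vulns : List (List (String × String))) : String :=
  let score : Nat := vulns.foldl (fun s v =>
    let sev := ((PySem.Dict.mk v).get? "severity").getD ""
    max s (if sev = "CRITICAL" then 3 else if sev = "HIGH" then 2 else 1)) 0
  -- score is always in 0..3, so Python's _RATINGS[score] never raises; getD is exact here
  pvRatings.getD score ""

-- ===== PRECONDITION & SPEC =====
-- Pre_ excludes inputs where some dict lacks the "severity" key: both A and B raise KeyError there.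
def Pre_get_security_rating (vulns : List (List (String × String))) : Prop :=
  ∀ v ∈ vulns, "severity" ∈ v.map Prod.fst
instance (vulns : List (List (String × String))) : Decidable (Pre_get_security_rating vulns) := by
  unfold Pre_get_security_rating; infer_instance
def pvWitness_get_security_rating : (List (List (String × String))) :=
  [[("severity", "HIGH"), ("id", "1")], [("severity", "LOW")]]

def Spec_get_security_rating (vulns : List (List (String × String))) (out : String) : Prop := out = get_security_rating_alt vulns
instance (vulns : List (List (String × String))) (out : String) : Decidable (Spec_get_security_rating vulns out) := by unfold Spec_get_security_rating; infer_instance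

-- ===== CLAIM (what is proved, stated in full; the proofs are below) =====
def Claim_equal_get_security_rating : Prop := ∀ (vulns : List (List (String × String))), Dom_get_security_rating vulns → Pre_get_security_rating vulns → Spec_get_security_rating vulns (get_security_rating vulns)

-- ===== LEMMAS AND PROOFS =====
def pvSev (v : List (String × String)) : String := ((PySem.Dict.mk v).get? "severity").getD ""
def pvScoreOf (v : List (String × String)) : Nat :=
  if pvSev v = "CRITICAL" then 3 else if pvSev v = "HIGH" then 2 else 1
def pvScore (l : List (List (String × String))) : Nat :=
  l.foldl (fun s v => max s (pvScoreOf v)) 0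

lemma pvFoldl_restart (l : List (List (String × String))) (n : Nat) :
    l.foldl (fun s v => max s (pvScoreOf v)) n
      = max n (l.foldl (fun s v => max s (pvScoreOf v)) 0) := by
  induction l generalizing n with
  | nil => simp
  | cons v t ih =>
    simp only [List.foldl_cons]
    rw [ih (max n (pvScoreOf v)), ih (max 0 (pvScoreOf v))]
    omega

lemma pvScore_cons (v : List (String × String)) (t : List (List (String × String))) :
    pvScore (v :: t) = max (pvScoreOf v) (pvScore t) := by
  unfold pvScore
  simp only [List.foldl_cons]
  rw [pvFoldl_restart]
  omega

lemma pvScoreOf_le (v : List (String × String)) : pvScoreOf v ≤ 3 := by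
  unfold pvScoreOf; split_ifs <;> omega

lemma pvScoreOf_pos (v : List (String × String)) : 1 ≤ pvScoreOf v := by
  unfold pvScoreOf; split_ifs <;> omega

lemma pvScore_le (l : List (List (String × String))) : pvScore l ≤ 3 := by
  induction l with
  | nil => simp [pvScore]
  | cons v t ih => rw [pvScore_cons]; exact max_le (pvScoreOf_le v) ih

lemma pvScore_ge_iff (l : List (List (String × String))) (k : Nat) (hk : 1 ≤ k) :
    k ≤ pvScore l ↔ ∃ v ∈ l, k ≤ pvScoreOf v := by
  induction l with
  | nil => simp [pvScore]; omega
  | cons v t ih =>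
    rw [pvScore_cons, le_max_iff, ih]
    simp only [List.mem_cons]
    constructor
    · rintro (h | ⟨w, hw, hkw⟩)
      · exact ⟨v, Or.inl rfl, h⟩
      · exact ⟨w, Or.inr hw, hkw⟩
    · rintro ⟨w, (rfl | hw), hkw⟩
      · exact Or.inl hkw
      · exact Or.inr ⟨w, hw, hkw⟩

lemma sev_exists (v : List (String × String)) (w : String) (h : ("severity", w) ∈ v) :
    ∃ s, (PySem.Dict.mk v).get? "severity" = some s := by
  induction v with
  | nil => simp at h
  | cons p t ih =>
    rw [PySem.Dict.get?_mk_cons]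
    by_cases hp : p.1 == "severity"
    · exact ⟨p.2, by simp [hp]⟩
    · simp only [hp, if_false]
      rcases List.mem_cons.mp h with heq | ht
      · exact absurd (by simp [← heq]) hp
      · exact ih ht

lemma count_pos_iff (l : List (List (String × String))) (s : String) :
    ((0 : Int) < l.foldl (fun (n : Int) v => if (PySem.Dict.mk v).get? "severity" = some s then n + 1 else n) 0)
      ↔ ∃ v ∈ l, (PySem.Dict.mk v).get? "severity" = some s := by
  have h : ∀ (n : Int), l.foldl (fun (n : Int) v => if (PySem.Dict.mk v).get? "severity" = some s then n + 1 else n) n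
      = n + ((l.countP (fun v => decide ((PySem.Dict.mk v).get? "severity" = some s))) : Int) := by
    induction l with
    | nil => simp
    | cons v t ih =>
      intro n
      by_cases hv : (PySem.Dict.mk v).get? "severity" = some s <;>
        simp [List.countP_cons, hv, ih] <;> ring
  rw [h 0]
  simp only [zero_add, Int.natCast_pos, List.countP_pos_iff, decide_eq_true_eq]

-- ===== VERDICT (by name: the statement is the Claim_ definition above) =====
theorem get_security_rating_spec : Claim_equal_get_security_rating := by
  intro vulns _ hpre
  unfold Spec_get_security_rating get_security_rating get_security_rating_alt
  have hsome : ∀ v ∈ vulns, ∃ t, (PySem.Dict.mk v).get? "severity" = some t := by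
    intro v hv
    rcases List.mem_map.mp (hpre v hv) with ⟨p, hp, hfst⟩
    exact sev_exists v p.2 (hfst ▸ hp)
  have hsev : ∀ v ∈ vulns, ∀ s : String,
      ((PySem.Dict.mk v).get? "severity" = some s ↔ pvSev v = s) := by
    intro v hv s
    rcases hsome v hv with ⟨t, ht⟩
    simp [pvSev, ht]
  have hscore : vulns.foldl (fun s v =>
      let sev := ((PySem.Dict.mk v).get? "severity").getD ""
      max s (if sev = "CRITICAL" then 3 else if sev = "HIGH" then 2 else 1)) 0 = pvScore vulns := rfl
  rw [hscore]
  have hle := pvScore_le vulns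
  by_cases hc : (0:Int) < vulns.foldl (fun (n : Int) v => if (PySem.Dict.mk v).get? "severity" = some "CRITICAL" then n + 1 else n) 0
  · -- critical > 0 : score = 3
    rcases (count_pos_iff vulns "CRITICAL").mp hc with ⟨v, hv, hvc⟩
    have h3 : 3 ≤ pvScore vulns := (pvScore_ge_iff vulns 3 (by omega)).mpr
      ⟨v, hv, by simp [pvScoreOf, (hsev v hv "CRITICAL").mp hvc]⟩
    have : pvScore vulns = 3 := by omega
    simp [gt_iff_lt, hc, this, pvRatings]
  · by_cases hh : (0:Int) < vulns.foldl (fun (n : Int) v => if (PySem.Dict.mk v).get? "severity" = some "HIGH" then n + 1 else n) 0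
    · -- high > 0, no critical : score = 2
      rcases (count_pos_iff vulns "HIGH").mp hh with ⟨v, hv, hvh⟩
      have h2 : 2 ≤ pvScore vulns := (pvScore_ge_iff vulns 2 (by omega)).mpr
        ⟨v, hv, by simp [pvScoreOf, (hsev v hv "HIGH").mp hvh]⟩
      have hn3 : ¬ 3 ≤ pvScore vulns := by
        intro h3
        rcases (pvScore_ge_iff vulns 3 (by omega)).mp h3 with ⟨w, hw, hw3⟩
        have : pvSev w = "CRITICAL" := by
          by_contra hne
          simp [pvScoreOf, hne] at hw3
          split_ifs at hw3 <;> omega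
        exact hc ((count_pos_iff vulns "CRITICAL").mpr ⟨w, hw, (hsev w hw "CRITICAL").mpr this⟩)
      have : pvScore vulns = 2 := by omega
      simp [gt_iff_lt, hc, hh, this, pvRatings]
    · by_cases hne : (0:Int) < (vulns.length : Int)
      · -- nonempty, no critical/high : score = 1
        have hnnil : vulns ≠ [] := by
          cases vulns with
          | nil => simp at hne
          | cons v t => simp
        have h1 : 1 ≤ pvScore vulns := by
          rcases List.exists_mem_of_ne_nil vulns hnnil with ⟨v, hv⟩
          exact (pvScore_ge_iff vulns 1 (by omega)).mpr ⟨v, hv, pvScoreOf_pos v⟩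
        have hn2 : ¬ 2 ≤ pvScore vulns := by
          intro h2
          rcases (pvScore_ge_iff vulns 2 (by omega)).mp h2 with ⟨w, hw, hw2⟩
          have : pvSev w = "CRITICAL" ∨ pvSev w = "HIGH" := by
            by_contra hor
            push_neg at hor
            simp [pvScoreOf, hor.1, hor.2] at hw2
          rcases this with h | h
          · exact hc ((count_pos_iff vulns "CRITICAL").mpr ⟨w, hw, (hsev w hw "CRITICAL").mpr h⟩)
          · exact hh ((count_pos_iff vulns "HIGH").mpr ⟨w, hw, (hsev w hw "HIGH").mpr h⟩)
        have : pvScore vulns = 1 := by omega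
        simp [gt_iff_lt, hc, hh, hnnil, this, pvRatings]
      · -- empty : score = 0
        have hnil : vulns = [] := by
          cases vulns with
          | nil => rfl
          | cons v t => exact absurd (by exact_mod_cast Nat.succ_pos t.length) hne
        subst hnil
        simp [pvScore, pvRatings]
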